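-- pv_equiv track=rewrite | github.com/ubuntu-dev/T-ENTacle | text-analysis/knowledge_extractor.py | createsign
-- ===== SOURCE A (Python) =====
-- def createsign(string):
--     def decide(arr):
--         if arr[0]=='A' and len(arr)>0:
--             return 'A'
--         if arr[0]=='d' and len(arr)>0:
--             return 'D~'
--         else:
--             return ''.join(arr)
--
--     signature=''
--     string=str(string)
--     for ch in string:
--         if ch.isalpha():
--             signature+='A'
--         elif ch.isnumeric():
--             signature+='d'
--         else:
--             signature+=ch
--
--     # condense the patterns to mark words
--     condensed_signature=''
--     buffer=[]
--     for i, ch in enumerate(signature):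
--         buffer.append(ch)
--         if i!=len(signature)-1 and ch!=signature[i+1]:
--             condensed_signature+=decide(buffer)
--             buffer=[]
--         elif i==len(signature)-1:
--             condensed_signature+=decide(buffer)
--
--
--     return condensed_signature
-- ===== SOURCE B (Python) =====
-- from itertools import groupby
--
--
-- def createsign(string):
--     def key(ch):
--         if ch.isalpha():
--             return 'A'
--         if ch.isnumeric():
--             return 'd'
--         return ch
--
--     pieces = []
--     for k, group in groupby(str(string), key):
--         if k == 'A':
--             pieces.append('A')
--         elif k == 'd':
--             pieces.append('D~')
--         else:
--             pieces.append(''.join(group))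
--     return ''.join(pieces)
-- ===== Notes on version B (the rewrite author's own statement) =====
-- stated objective: simpler
-- what changed: A builds the full char-class signature string in one pass and then condenses it with an index/buffer loop over it; B fuses both passes into a single itertools.groupby traversal keyed directly on the original characters, never materialising the signature.
import Mathlib
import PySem

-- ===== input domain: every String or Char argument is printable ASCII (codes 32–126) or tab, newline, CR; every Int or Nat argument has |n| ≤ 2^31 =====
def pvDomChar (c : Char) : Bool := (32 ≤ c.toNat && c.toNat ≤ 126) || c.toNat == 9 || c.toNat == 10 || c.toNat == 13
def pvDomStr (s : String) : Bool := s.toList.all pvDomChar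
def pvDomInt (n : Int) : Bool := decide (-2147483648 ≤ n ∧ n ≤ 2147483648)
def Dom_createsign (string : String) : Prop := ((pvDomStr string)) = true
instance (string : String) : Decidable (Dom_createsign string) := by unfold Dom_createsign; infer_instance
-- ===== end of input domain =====

-- B fuses A's two passes (build the signature string, then condense it with an
-- index/buffer loop) into one groupby-style traversal keyed on the original chars.
-- ch.isnumeric() is ported as PySem.Chars.isdigit, exact on the ASCII domain.

-- ===== PORT A =====
-- decide(arr): arr is always nonempty where A calls it; arr[0] via pyGet?
def pvDecideA (arr : List Char) : String :=
  if PySem.List.pyGet? arr 0 = some 'A' then "A"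
  else if PySem.List.pyGet? arr 0 = some 'd' then "D~"
  else String.mk arr

-- the second loop: for i, ch in enumerate(signature) with the next-char / last-index tests
def pvCondenseA (buffer : List Char) : List Char → String
  | [] => ""
  | ch :: rest =>
    let buf := buffer ++ [ch]
    match rest with
    | [] => pvDecideA buf
    | next :: _ =>
      if ch ≠ next then pvDecideA buf ++ pvCondenseA [] rest
      else pvCondenseA buf rest

def createsign (string : String) : String :=
  let signature : List Char := string.toList.foldl
    (fun acc ch =>
      acc ++ [if PySem.Chars.isalpha ch then 'A'
              else if PySem.Chars.isdigit ch then 'd' else ch]) []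
  pvCondenseA [] signature

-- ===== PORT B =====
def pvKey (ch : Char) : Char :=
  if PySem.Chars.isalpha ch then 'A'
  else if PySem.Chars.isdigit ch then 'd' else ch

def pvPiece (k : Char) (run : List Char) : String :=
  if k = 'A' then "A" else if k = 'd' then "D~" else String.mk run

-- groupby(string, key): peel one maximal equal-key run at a time
def pvGroups : List Char → String
  | [] => ""
  | c :: rest =>
    pvPiece (pvKey c) (c :: rest.takeWhile (fun x => pvKey x == pvKey c)) ++
      pvGroups (rest.dropWhile (fun x => pvKey x == pvKey c))
termination_by l => l.length
decreasing_by
  simp only [List.length_cons]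
  exact Nat.lt_succ_of_le (List.length_dropWhile_le _ _)

def createsign_alt (string : String) : String := pvGroups string.toList

-- ===== PRECONDITION & SPEC =====
def Spec_createsign (string : String) (out : String) : Prop := out = createsign_alt string
instance (string : String) (out : String) : Decidable (Spec_createsign string out) := by unfold Spec_createsign; infer_instance

-- ===== CLAIM (what is proved, stated in full; the proofs are below) =====
def Claim_equal_createsign : Prop := ∀ (string : String), Dom_createsign string → Spec_createsign string (createsign string)

-- ===== LEMMAS AND PROOFS =====

-- condensing a signature list by equal-char runs (proof-side normal form)
def pvGoSig : List Char → String
  | [] => ""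
  | c :: rest =>
    (if c = 'A' then "A" else if c = 'd' then "D~"
     else String.mk (c :: rest.takeWhile (fun x => x == c))) ++
      pvGoSig (rest.dropWhile (fun x => x == c))
termination_by l => l.length
decreasing_by
  simp only [List.length_cons]
  exact Nat.lt_succ_of_le (List.length_dropWhile_le _ _)

theorem pvFoldl_map (f : Char → Char) (l acc : List Char) :
    l.foldl (fun a c => a ++ [f c]) acc = acc ++ l.map f := by
  induction l generalizing acc with
  | nil => simp
  | cons c t ih => simp [List.foldl, ih]

theorem pvKey_fix {c : Char} (h1 : pvKey c ≠ 'A') (h2 : pvKey c ≠ 'd') : pvKey c = c := by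
  unfold pvKey at *
  split_ifs at * <;> simp_all

theorem pvKey_eq_nonspecial {c x : Char} (h1 : c ≠ 'A') (h2 : c ≠ 'd')
    (h : pvKey x = c) : x = c := by
  unfold pvKey at h
  split_ifs at h
  · exact absurd h.symm h1
  · exact absurd h.symm h2
  · exact h

theorem pvGroups_eq_goSig (l : List Char) : pvGroups l = pvGoSig (l.map pvKey) := by
  induction l using pvGroups.induct with
  | case1 => simp [pvGroups, pvGoSig]
  | case2 c rest ih =>
    rw [pvGroups, List.map_cons, pvGoSig]
    have htw : (rest.map pvKey).takeWhile (fun x => x == pvKey c)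
        = (rest.takeWhile (fun x => pvKey x == pvKey c)).map pvKey := by
      rw [List.takeWhile_map]; rfl
    have hdw : (rest.map pvKey).dropWhile (fun x => x == pvKey c)
        = (rest.dropWhile (fun x => pvKey x == pvKey c)).map pvKey := by
      rw [List.dropWhile_map]; rfl
    rw [htw, hdw, ← ih]
    congr 1
    by_cases hA : pvKey c = 'A'
    · simp [pvPiece, hA]
    · by_cases hd : pvKey c = 'd'
      · simp [pvPiece, hd]
      · have hc : pvKey c = c := pvKey_fix hA hd
        have hcA : c ≠ 'A' := hc ▸ hA
        have hcd : c ≠ 'd' := hc ▸ hd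
        have hmap : (rest.takeWhile (fun x => pvKey x == pvKey c)).map pvKey
            = rest.takeWhile (fun x => pvKey x == pvKey c) := by
          have h1 : ∀ x ∈ rest.takeWhile (fun x => pvKey x == pvKey c), pvKey x = x := by
            intro x hx
            have hpx : pvKey x = pvKey c := by
              have := List.mem_takeWhile_imp hx
              simpa using this
            have hxc : x = c := pvKey_eq_nonspecial hcA hcd (hpx.trans hc)
            rw [hxc, hc]
          calc (rest.takeWhile (fun x => pvKey x == pvKey c)).map pvKey
              = (rest.takeWhile (fun x => pvKey x == pvKey c)).map id :=
                List.map_congr_left h1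
            _ = _ := List.map_id _
        rw [hmap]
        simp [pvPiece, hc, hcA, hcd]

theorem pvCondense_run (rest : List Char) :
    ∀ (b : List Char) (c : Char), (∀ x ∈ b, x = c) →
    (∀ s : List Char, s.length ≤ rest.length → pvCondenseA [] s = pvGoSig s) →
    pvCondenseA b (c :: rest)
      = pvDecideA (b ++ c :: rest.takeWhile (fun x => x == c))
        ++ pvGoSig (rest.dropWhile (fun x => x == c)) := by
  induction rest with
  | nil =>
    intro b c _ _
    simp [pvCondenseA, pvGoSig]
  | cons next xs ih =>
    intro b c hb hrec
    by_cases hcn : c = next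
    · subst hcn
      have h1 : pvCondenseA b (c :: c :: xs) = pvCondenseA (b ++ [c]) (c :: xs) := by
        simp [pvCondenseA]
      rw [h1, ih (b ++ [c]) c
            (by intro x hx; rcases List.mem_append.mp hx with h | h
                · exact hb x h
                · simpa using h)
            (fun s hs => hrec s (by simp at *; omega))]
      have ht : (c :: xs).takeWhile (fun x => x == c) = c :: xs.takeWhile (fun x => x == c) := by
        simp
      have hd : (c :: xs).dropWhile (fun x => x == c) = xs.dropWhile (fun x => x == c) := by
        simp
      rw [ht, hd]
      simp
    · have h1 : pvCondenseA b (c :: next :: xs)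
          = pvDecideA (b ++ [c]) ++ pvCondenseA [] (next :: xs) := by
        simp [pvCondenseA, hcn]
      rw [h1, hrec (next :: xs) (by simp)]
      have ht : (next :: xs).takeWhile (fun x => x == c) = [] := by
        simp [Ne.symm hcn]
      have hd : (next :: xs).dropWhile (fun x => x == c) = next :: xs := by
        simp [Ne.symm hcn]
      rw [ht, hd]

theorem pvCondense_eq_goSig (s : List Char) : pvCondenseA [] s = pvGoSig s := by
  have main : ∀ n (s : List Char), s.length ≤ n → pvCondenseA [] s = pvGoSig s := by
    intro n
    induction n with
    | zero =>
      intro s hs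
      have : s = [] := List.eq_nil_of_length_eq_zero (Nat.le_zero.mp hs)
      subst this; simp [pvCondenseA, pvGoSig]
    | succ n ihn =>
      intro s hs
      cases s with
      | nil => simp [pvCondenseA, pvGoSig]
      | cons c rest =>
        rw [pvCondense_run rest [] c (by simp)
              (fun s' hs' => ihn s' (by simp at hs; omega))]
        rw [pvGoSig]
        congr 1
        simp [pvDecideA, PySem.List.pyGet?, PySem.List.pyIdx?]
  exact main s.length s le_rfl


-- ===== VERDICT (by name: the statement is the Claim_ definition above) =====
theorem createsign_spec : Claim_equal_createsign := by
  intro s _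
  unfold Spec_createsign createsign createsign_alt
  rw [pvFoldl_map]
  have hkey : (fun ch => if PySem.Chars.isalpha ch then 'A'
      else if PySem.Chars.isdigit ch then 'd' else ch) = pvKey := by
    funext ch; rfl
  simp only [List.nil_append, hkey]
  rw [pvCondense_eq_goSig, pvGroups_eq_goSig]
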